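-- pv_equiv track=rewrite | github.com/karthik-kumarux/web-development | ADS/week10/week10.py | merge_purge
-- ===== SOURCE A (Python) =====
-- def merge_purge(s1, s2):
--     merged = sorted(s1+s2, key = lambda x:(x[0],-x[1]))
--     result = []
--     max_profit = -1
--     for profit, weight in merged:
--         if profit > max_profit:
--             result.append((profit, weight))
--             max_profit = profit
--     return result
-- ===== SOURCE B (Python) =====
-- def merge_purge(s1, s2):
--     """Merge the two profit/weight lists and purge: drop negative-profit pairs,
--     keep one pair per distinct profit (its maximum weight), in increasing profit order."""
--     pairs = s1 + s2
--     profits = sorted({p for p, w in pairs if p >= 0})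
--     return [(p, max(w for q, w in pairs if q == p)) for p in profits]
-- ===== Notes on version B (the rewrite author's own statement) =====
-- stated objective: alternative
-- what changed: A sorts the whole concatenation by (profit, -weight) and scans it with a running max_profit; B is declarative: it collects the set of distinct nonnegative profits, sorts those keys, and pairs each with the maximum weight found for that profit.
import Mathlib
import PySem

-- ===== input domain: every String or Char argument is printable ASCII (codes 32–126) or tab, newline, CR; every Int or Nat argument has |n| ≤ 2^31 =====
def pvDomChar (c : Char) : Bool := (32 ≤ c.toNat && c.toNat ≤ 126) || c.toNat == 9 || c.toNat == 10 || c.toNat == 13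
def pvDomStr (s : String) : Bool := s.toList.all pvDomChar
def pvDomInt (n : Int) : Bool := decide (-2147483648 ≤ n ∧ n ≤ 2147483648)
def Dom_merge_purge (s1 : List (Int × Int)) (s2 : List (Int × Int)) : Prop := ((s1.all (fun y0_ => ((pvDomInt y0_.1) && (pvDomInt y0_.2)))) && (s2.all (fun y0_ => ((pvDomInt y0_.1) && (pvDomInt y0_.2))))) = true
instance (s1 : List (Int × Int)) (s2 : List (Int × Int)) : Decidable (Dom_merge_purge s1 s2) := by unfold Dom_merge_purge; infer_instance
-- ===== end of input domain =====

-- B replaces A's sort-everything-then-scan by a declarative build: distinct nonnegative profits, sorted, each paired with its maximum weight (objective: alternative).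

-- ===== PORT A =====
def merge_purge (s1 : List (Int × Int)) (s2 : List (Int × Int)) : List (Int × Int) :=
  let merged := PySem.List.sorted2 (s1 ++ s2) (fun x => x.1) (fun x => -x.2)
  let r := merged.foldl
    (fun (st : List (Int × Int) × Int) pw => if pw.1 > st.2 then (st.1 ++ [pw], pw.1) else st)
    ([], -1)
  r.1

-- ===== PORT B =====
def merge_purge_alt (s1 : List (Int × Int)) (s2 : List (Int × Int)) : List (Int × Int) :=
  let pairs := s1 ++ s2
  let profits := PySem.List.sorted
    (PySem.Set.ofList ((pairs.filter (fun y => decide (0 ≤ y.1))).map (fun y => y.1)))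
    (fun p => p) false
  -- max(w for q, w in pairs if q == p): p is drawn from profits, so the generator is
  -- never empty and max? is never none; .getD 0 is unreachable
  profits.map (fun p =>
    (p, (PySem.List.max? ((pairs.filter (fun y => y.1 == p)).map (fun y => y.2))
          (fun w => w)).getD 0))

-- ===== PRECONDITION & SPEC =====
def Spec_merge_purge (s1 : List (Int × Int)) (s2 : List (Int × Int)) (out : List (Int × Int)) : Prop := out = merge_purge_alt s1 s2
instance (s1 : List (Int × Int)) (s2 : List (Int × Int)) (out : List (Int × Int)) : Decidable (Spec_merge_purge s1 s2 out) := by unfold Spec_merge_purge; infer_instance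

-- ===== CLAIM (what is proved, stated in full; the proofs are below) =====
def Claim_equal_merge_purge : Prop := ∀ (s1 : List (Int × Int)) (s2 : List (Int × Int)), Dom_merge_purge s1 s2 → Spec_merge_purge s1 s2 (merge_purge s1 s2)

-- ===== LEMMAS AND PROOFS =====

-- ---- proof-side helper definitions ----

def pvAStep (st : List (Int × Int) × Int) (pw : Int × Int) : List (Int × Int) × Int :=
  if pw.1 > st.2 then (st.1 ++ [pw], pw.1) else st

def pvARec : List (Int × Int) → Int → List (Int × Int)
  | [], _ => []
  | x :: t, mp => if x.1 > mp then x :: pvARec t x.1 else pvARec t mp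

def pvR (a b : Int × Int) : Prop := a.1 < b.1 ∨ (a.1 = b.1 ∧ b.2 ≤ a.2)

def pvBest (l : List (Int × Int)) (z : Int × Int) : Prop :=
  z ∈ l ∧ ∀ y ∈ l, y.1 = z.1 → y.2 ≤ z.2

def pvBef (a b : Int × Int) : Bool :=
  decide (a.1 < b.1) || !decide (b.1 < a.1) && decide (-a.2 < -b.2)

-- ---- the sorted list of A is pairwise pvR ----

theorem pvR_of_bef {a b : Int × Int} (h : pvBef a b = true) : pvR a b := by
  simp [pvBef] at h; unfold pvR; omega

theorem pvR_of_not_bef {a b : Int × Int} (h : pvBef a b = false) : pvR b a := by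
  simp [pvBef] at h; unfold pvR; omega

theorem pvR_trans {a b c : Int × Int} (h1 : pvR a b) (h2 : pvR b c) : pvR a c := by
  unfold pvR at *; omega

theorem pairwise_insertBy {x : Int × Int} {ys : List (Int × Int)}
    (h : ys.Pairwise pvR) : (PySem.List.insertBy pvBef x ys).Pairwise pvR := by
  induction ys with
  | nil => simp [PySem.List.insertBy]
  | cons y t ih =>
    rw [List.pairwise_cons] at h
    by_cases hb : pvBef x y = true
    · rw [PySem.List.insertBy, if_pos hb]
      refine List.Pairwise.cons ?_ (List.Pairwise.cons h.1 h.2)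
      intro z hz
      rcases List.mem_cons.mp hz with rfl | hz
      · exact pvR_of_bef hb
      · exact pvR_trans (pvR_of_bef hb) (h.1 z hz)
    · rw [PySem.List.insertBy, if_neg hb]
      refine List.Pairwise.cons ?_ (ih h.2)
      intro z hz
      rcases (PySem.List.mem_insertBy _ _ _ _).mp hz with rfl | hz
      · exact pvR_of_not_bef (by simpa using hb)
      · exact h.1 z hz

theorem pairwise_sorted2 (l : List (Int × Int)) :
    (PySem.List.sorted2 l (fun x => x.1) (fun x => -x.2)).Pairwise pvR := by
  have hrw : PySem.List.sorted2 l (fun x => x.1) (fun x => -x.2)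
      = l.foldl (fun acc x => PySem.List.insertBy pvBef x acc) [] := rfl
  rw [hrw]
  have key : ∀ (l : List (Int × Int)) (acc : List (Int × Int)), acc.Pairwise pvR →
      (l.foldl (fun acc x => PySem.List.insertBy pvBef x acc) acc).Pairwise pvR := by
    intro l
    induction l with
    | nil => intro acc h; simpa using h
    | cons x t ih => intro acc h; exact ih _ (pairwise_insertBy h)
  exact key l [] (by simp)

-- ---- A's scan ----

theorem foldl_pvAStep (m : List (Int × Int)) :
    ∀ (acc : List (Int × Int)) (mp : Int),
      (m.foldl pvAStep (acc, mp)).1 = acc ++ pvARec m mp := by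
  induction m with
  | nil => intro acc mp; simp [pvARec]
  | cons x t ih =>
    intro acc mp
    by_cases hx : x.1 > mp
    · simp only [List.foldl_cons, pvAStep, if_pos hx, pvARec, ih, List.append_assoc,
        List.singleton_append]
    · simp only [List.foldl_cons, pvAStep, if_neg hx, pvARec, ih]

theorem pvARec_gt_pairwise : ∀ (m : List (Int × Int)) (mp : Int),
    (∀ z ∈ pvARec m mp, mp < z.1) ∧ (pvARec m mp).Pairwise (fun a b => a.1 < b.1) := by
  intro m
  induction m with
  | nil => intro mp; simp [pvARec]
  | cons x t ih =>
    intro mp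
    by_cases hx : x.1 > mp
    · rw [pvARec, if_pos hx]
      refine ⟨?_, ?_⟩
      · intro z hz
        rcases List.mem_cons.mp hz with rfl | hz
        · exact hx
        · exact lt_trans hx ((ih x.1).1 z hz)
      · exact List.Pairwise.cons (fun z hz => (ih x.1).1 z hz) (ih x.1).2
    · rw [pvARec, if_neg hx]; exact ih mp

theorem mem_pvARec : ∀ (m : List (Int × Int)), m.Pairwise pvR →
    ∀ (mp : Int) (z : Int × Int), z ∈ pvARec m mp ↔ mp < z.1 ∧ pvBest m z := by
  intro m
  induction m with
  | nil => intro _ mp z; simp [pvARec, pvBest]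
  | cons x t ih =>
    intro h mp z
    rw [List.pairwise_cons] at h
    by_cases hx : x.1 > mp
    · rw [pvARec, if_pos hx]
      constructor
      · intro hz
        rcases List.mem_cons.mp hz with rfl | hz
        · refine ⟨hx, List.mem_cons_self, ?_⟩
          intro y hy hyz
          rcases List.mem_cons.mp hy with rfl | hy
          · exact le_rfl
          · rcases h.1 y hy with hlt | ⟨heq, hle⟩
            · omega
            · exact hle
        · obtain ⟨hgt, hmem, hbd⟩ := (ih h.2 x.1 z).mp hz
          refine ⟨lt_trans hx hgt, List.mem_cons_of_mem _ hmem, ?_⟩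
          intro y hy hyz
          rcases List.mem_cons.mp hy with rfl | hy
          · rcases h.1 z hmem with hlt | ⟨heq, hle⟩ <;> omega
          · exact hbd y hy hyz
      · rintro ⟨hgt, hmem, hbd⟩
        rcases List.mem_cons.mp hmem with rfl | hmem
        · exact List.mem_cons_self
        · rcases h.1 z hmem with hlt | ⟨heq, hle⟩
          · refine List.mem_cons_of_mem _ ((ih h.2 x.1 z).mpr ⟨hlt, hmem, ?_⟩)
            intro y hy hyz
            exact hbd y (List.mem_cons_of_mem _ hy) hyz
          · have hx2 : x.2 ≤ z.2 := hbd x List.mem_cons_self heq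
            have hzx : z = x := Prod.ext heq.symm (le_antisymm hle hx2)
            rw [hzx]
            exact List.mem_cons_self
    · rw [pvARec, if_neg hx]
      rw [ih h.2 mp z]
      constructor
      · rintro ⟨hgt, hmem, hbd⟩
        refine ⟨hgt, List.mem_cons_of_mem _ hmem, ?_⟩
        intro y hy hyz
        rcases List.mem_cons.mp hy with rfl | hy
        · omega
        · exact hbd y hy hyz
      · rintro ⟨hgt, hmem, hbd⟩
        rcases List.mem_cons.mp hmem with rfl | hmem
        · omega
        · exact ⟨hgt, hmem, fun y hy hyz => hbd y (List.mem_cons_of_mem _ hy) hyz⟩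

-- ---- B's dict fold, seen through get? ----






-- ---- tying the two results together ----



theorem max_wts (pairs : List (Int × Int)) (p v : Int) :
    PySem.List.max? ((pairs.filter (fun y => y.1 == p)).map (fun y => y.2)) (fun w => w)
      = some v
    ↔ (p, v) ∈ pairs ∧ ∀ y ∈ pairs, y.1 = p → y.2 ≤ v := by
  constructor
  · intro h
    have hmem := PySem.List.max?_mem h
    have hmax := PySem.List.max?_isMax h
    simp only [List.mem_map, List.mem_filter, beq_iff_eq] at hmem
    obtain ⟨y, ⟨hy, hy1⟩, hy2⟩ := hmem
    have hyv : y = (p, v) := Prod.ext hy1 hy2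
    refine ⟨hyv ▸ hy, ?_⟩
    intro z hz hz1
    have : z.2 ∈ (pairs.filter (fun y => y.1 == p)).map (fun y => y.2) := by
      simp only [List.mem_map, List.mem_filter, beq_iff_eq]
      exact ⟨z, ⟨hz, hz1⟩, rfl⟩
    simpa using hmax _ this
  · rintro ⟨hmem, hbd⟩
    have hv : v ∈ (pairs.filter (fun y => y.1 == p)).map (fun y => y.2) := by
      simp only [List.mem_map, List.mem_filter, beq_iff_eq]
      exact ⟨(p, v), ⟨hmem, rfl⟩, rfl⟩
    have hne : (pairs.filter (fun y => y.1 == p)).map (fun y => y.2) ≠ [] := by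
      intro h0; rw [h0] at hv; simp at hv
    obtain ⟨m, hm⟩ := Option.ne_none_iff_exists'.mp
      (fun h0 => hne ((PySem.List.max?_eq_none_iff
        ((pairs.filter (fun y => y.1 == p)).map (fun y => y.2)) (fun w : Int => w)).mp h0))
    have hmm := PySem.List.max?_mem hm
    have hmax := PySem.List.max?_isMax hm
    simp only [List.mem_map, List.mem_filter, beq_iff_eq] at hmm
    obtain ⟨y, ⟨hy, hy1⟩, hy2⟩ := hmm
    have h1 : m ≤ v := hy2 ▸ hbd y hy hy1
    have h2 : v ≤ m := by simpa using hmax _ hv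
    rw [hm, le_antisymm h1 h2]

theorem mem_profits (pairs : List (Int × Int)) (p : Int) :
    p ∈ PySem.List.sorted
        (PySem.Set.ofList ((pairs.filter (fun y => decide (0 ≤ y.1))).map (fun y => y.1)))
        (fun q => q) false
    ↔ ∃ y ∈ pairs, 0 ≤ y.1 ∧ y.1 = p := by
  rw [PySem.List.mem_sorted, PySem.Set.mem_ofList]
  simp only [List.mem_map, List.mem_filter, decide_eq_true_eq]
  constructor
  · rintro ⟨y, ⟨hy, h0⟩, h1⟩; exact ⟨y, hy, h0, h1⟩
  · rintro ⟨y, hy, h0, h1⟩; exact ⟨y, ⟨hy, h0⟩, h1⟩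

theorem mem_merge_purge_alt (s1 s2 : List (Int × Int)) (z : Int × Int) :
    z ∈ merge_purge_alt s1 s2 ↔ 0 ≤ z.1 ∧ pvBest (s1 ++ s2) z := by
  have hb : merge_purge_alt s1 s2
      = (PySem.List.sorted
          (PySem.Set.ofList (((s1 ++ s2).filter (fun y => decide (0 ≤ y.1))).map (fun y => y.1)))
          (fun p => p) false).map (fun p =>
          (p, (PySem.List.max? (((s1 ++ s2).filter (fun y => y.1 == p)).map (fun y => y.2))
                (fun w => w)).getD 0)) := rfl
  rw [hb]
  simp only [List.mem_map]
  constructor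
  · rintro ⟨p, hp, hz⟩
    obtain ⟨y, hy, hy0, hy1⟩ := (mem_profits (s1 ++ s2) p).mp hp
    have hvne : PySem.List.max? (((s1 ++ s2).filter (fun y => y.1 == p)).map (fun y => y.2))
        (fun w => w) ≠ none := by
      intro h0
      have he := (PySem.List.max?_eq_none_iff _ _).mp h0
      have hm2 : y.2 ∈ (((s1 ++ s2).filter (fun y => y.1 == p)).map (fun y => y.2)) := by
        simp only [List.mem_map, List.mem_filter, beq_iff_eq]
        exact ⟨y, ⟨hy, hy1⟩, rfl⟩
      rw [he] at hm2; simp at hm2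
    obtain ⟨v, hv⟩ := Option.ne_none_iff_exists'.mp hvne
    obtain ⟨hmem, hbd⟩ := (max_wts (s1 ++ s2) p v).mp hv
    have hzv : z = (p, v) := by rw [← hz, hv]; rfl
    rw [hzv]
    refine ⟨hy1 ▸ hy0, hmem, fun y' hy' h1 => hbd y' hy' h1⟩
  · rintro ⟨h0, hmem, hbd⟩
    refine ⟨z.1, (mem_profits (s1 ++ s2) z.1).mpr ⟨z, hmem, h0, rfl⟩, ?_⟩
    have hv : PySem.List.max? (((s1 ++ s2).filter (fun y => y.1 == z.1)).map (fun y => y.2))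
        (fun w => w) = some z.2 :=
      (max_wts (s1 ++ s2) z.1 z.2).mpr ⟨by simpa using hmem, hbd⟩
    rw [hv]
    rfl

theorem pairwise_fst_merge_purge_alt (s1 s2 : List (Int × Int)) :
    (merge_purge_alt s1 s2).Pairwise (fun a b => a.1 < b.1) := by
  have hb : merge_purge_alt s1 s2
      = (PySem.List.sorted
          (PySem.Set.ofList (((s1 ++ s2).filter (fun y => decide (0 ≤ y.1))).map (fun y => y.1)))
          (fun p => p) false).map (fun p =>
          (p, (PySem.List.max? (((s1 ++ s2).filter (fun y => y.1 == p)).map (fun y => y.2))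
                (fun w => w)).getD 0)) := rfl
  rw [hb, List.pairwise_map]
  exact PySem.List.sorted_ofList_pairwise_lt _

theorem pvBest_perm {m l : List (Int × Int)} (h : m.Perm l) (z : Int × Int) :
    pvBest m z ↔ pvBest l z := by
  unfold pvBest
  constructor
  · rintro ⟨hm, hb⟩; exact ⟨h.mem_iff.mp hm, fun y hy => hb y (h.mem_iff.mpr hy)⟩
  · rintro ⟨hm, hb⟩; exact ⟨h.mem_iff.mpr hm, fun y hy => hb y (h.mem_iff.mp hy)⟩

theorem merge_purge_eq_pvARec (s1 s2 : List (Int × Int)) :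
    merge_purge s1 s2
      = pvARec (PySem.List.sorted2 (s1 ++ s2) (fun x => x.1) (fun x => -x.2)) (-1) := by
  have h : merge_purge s1 s2
      = ((PySem.List.sorted2 (s1 ++ s2) (fun x => x.1) (fun x => -x.2)).foldl
          pvAStep ([], -1)).1 := rfl
  rw [h, foldl_pvAStep]
  simp


theorem pairwise_fst_merge_purge (s1 s2 : List (Int × Int)) :
    (merge_purge s1 s2).Pairwise (fun a b => a.1 < b.1) := by
  rw [merge_purge_eq_pvARec]
  exact (pvARec_gt_pairwise _ _).2

theorem mem_merge_purge (s1 s2 : List (Int × Int)) (z : Int × Int) :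
    z ∈ merge_purge s1 s2 ↔ -1 < z.1 ∧ pvBest (s1 ++ s2) z := by
  rw [merge_purge_eq_pvARec,
    mem_pvARec _ (pairwise_sorted2 _) (-1) z,
    pvBest_perm (PySem.List.sorted2_perm (s1 ++ s2) _ _ _) z]


-- ===== VERDICT (by name: the statement is the Claim_ definition above) =====
theorem merge_purge_spec : Claim_equal_merge_purge := by
  intro s1 s2 _
  unfold Spec_merge_purge
  have h1 := pairwise_fst_merge_purge s1 s2
  have h2 := pairwise_fst_merge_purge_alt s1 s2
  refine List.Perm.eq_of_pairwise ?_ h1 h2 ?_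
  · intro a b _ _ hab hba; exfalso; omega
  · rw [List.perm_ext_iff_of_nodup
      (h1.imp fun {a b} hab => by intro e; rw [e] at hab; exact lt_irrefl _ hab)
      (h2.imp fun {a b} hab => by intro e; rw [e] at hab; exact lt_irrefl _ hab)]
    intro z
    rw [mem_merge_purge, mem_merge_purge_alt]
    constructor
    · rintro ⟨hgt, hb⟩; exact ⟨by omega, hb⟩
    · rintro ⟨h0, hb⟩; exact ⟨by omega, hb⟩
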